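-- pv_equiv track=rewrite | github.com/elmjonas/ACDB | Articles/jensen22_lumi_benchmark/JKQCpickle.py | dash
-- ===== SOURCE A (Python) =====
-- def dash(input_array):
--   output_array = [input_array]
--   for element in range(len(input_array)):
--     if input_array[element] == "-":
--       partbefore = input_array[0:element-1]
--       partafter = input_array[element+2:]
--       output_array_1 = []
--       try:
--         num1=int(input_array[element-1])
--         num2=int(input_array[element+1])+1
--         output_array = []
--       except:
--         break
--       for thenumber in range(int(input_array[element-1]),int(input_array[element+1])+1):
--         output_array_1.append(partbefore+[str(thenumber)]+partafter)
--       for i in output_array_1: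
--         for j in dash(i):
--           output_array.append(j)
--       break
--   return output_array
-- ===== SOURCE B (Python) =====
-- def dash(input_array):
--     # Level-synchronous rewriting: keep one ordered worklist of (done, arr) items and
--     # expand every unfinished item's first dash each round until all are done.
--     items = [(False, input_array)]
--     while not all(done for done, _ in items):
--         new_items = []
--         for done, arr in items:
--             if done:
--                 new_items.append((True, arr))
--                 continue
--             i = next((k for k, e in enumerate(arr) if e == "-"), None)
--             if i is None:
--                 new_items.append((True, arr))
--                 continue
--             try:
--                 num1 = int(arr[i - 1])
--                 num2 = int(arr[i + 1])
--             except (ValueError, IndexError):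
--                 new_items.append((True, arr))
--                 continue
--             before, after = arr[:i - 1], arr[i + 2:]
--             new_items.extend((False, before + [str(n)] + after) for n in range(num1, num2 + 1))
--         items = new_items
--     return [arr for _, arr in items]
-- ===== Notes on version B (the rewrite author's own statement) =====
-- stated objective: alternative
-- what changed: Replaces A's depth-first recursion (recursive call per expanded array) with an iterative level-synchronous worklist: one ordered list of (done, array) items is rewritten round by round, expanding every unfinished array's first dash range in place, which preserves A's output order without any recursion.
import Mathlib
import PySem

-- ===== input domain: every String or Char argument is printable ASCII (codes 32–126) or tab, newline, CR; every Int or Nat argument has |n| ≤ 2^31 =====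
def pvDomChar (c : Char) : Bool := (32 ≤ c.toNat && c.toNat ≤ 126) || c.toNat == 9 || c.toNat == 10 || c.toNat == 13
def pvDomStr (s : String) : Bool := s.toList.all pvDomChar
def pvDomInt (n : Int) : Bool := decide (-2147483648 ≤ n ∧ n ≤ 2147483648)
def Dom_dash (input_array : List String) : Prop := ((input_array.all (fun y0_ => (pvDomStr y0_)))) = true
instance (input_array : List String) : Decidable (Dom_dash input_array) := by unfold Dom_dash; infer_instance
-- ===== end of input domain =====

-- B rewrites A's depth-first recursive dash expansion as an iterative round-by-round
-- worklist rewrite with the same output order (objective: alternative decomposition, no speed claim).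

-- ===== PORT A =====
-- the 'for element in range(len(...))' scan with its break paths; 'rec' stands for the recursive call dash(i)
def dashLoop (rec : List String → List (List String)) (arr : List String) (e : Nat)
    (out : List (List String)) : List (List String) :=
  if h : e < arr.length then
    if arr[e] = "-" then
      let partbefore := PySem.List.slice arr (some 0) (some ((e : Int) - 1))
      let partafter := PySem.List.slice arr (some ((e : Int) + 2)) none
      match (PySem.List.pyGet? arr ((e : Int) - 1)).bind PySem.Int.ofStr?,
            (PySem.List.pyGet? arr ((e : Int) + 1)).bind PySem.Int.ofStr? with
      | some num1, some num2 =>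
          -- output_array := []; output_array_1 over range(num1, num2+1); then the recursive appends
          (((PySem.List.pyRange num1 (num2 + 1) 1).map
              (fun thenumber => partbefore ++ [PySem.Int.toStr thenumber] ++ partafter)).flatMap rec)
      | _, _ => out      -- 'except: break' → return output_array (= [input_array])
    else dashLoop rec arr (e + 1) out
  else out
termination_by arr.length - e

-- fuel = recursion depth; ample on every input admitted by Pre_dash
def dashF : Nat → List String → List (List String)
  | 0, arr => [arr]
  | f + 1, arr => dashLoop (dashF f) arr 0 [arr]

def dash (input_array : List String) : List (List String) :=
  dashF (input_array.length + 1) input_array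

-- ===== PORT B =====
-- first index holding "-" (B's next(enumerate(...)) scan)
def findDash : List String → Nat → Option Nat
  | [], _ => none
  | s :: rest, k => if s = "-" then some k else findDash rest (k + 1)

-- one worklist item step: none = emit unchanged, some cs = replace by its expansions
def stepB (arr : List String) : Option (List (List String)) :=
  match findDash arr 0 with
  | none => none
  | some i =>
    match (PySem.List.pyGet? arr ((i : Int) - 1)).bind PySem.Int.ofStr?,
          (PySem.List.pyGet? arr ((i : Int) + 1)).bind PySem.Int.ofStr? with
    | some num1, some num2 =>
        some ((PySem.List.pyRange num1 (num2 + 1) 1).map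
          (fun n => PySem.List.slice arr (some 0) (some ((i : Int) - 1)) ++
                    [PySem.Int.toStr n] ++
                    PySem.List.slice arr (some ((i : Int) + 2)) none))
    | _, _ => none

-- one round over the whole worklist
def expandOnce (items : List (Bool × List String)) : List (Bool × List String) :=
  items.flatMap (fun it =>
    if it.1 then [it] else
      match stepB it.2 with
      | none => [(true, it.2)]
      | some cs => cs.map (fun c => (false, c)))

-- the 'while not all done' loop, with round fuel (ample on every input admitted by Pre_dash)
def roundsB : Nat → List (Bool × List String) → List (List String)
  | 0, items => items.map (fun it => it.2)
  | f + 1, items =>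
      if items.all (fun it => it.1) then items.map (fun it => it.2)
      else roundsB f (expandOnce items)

def dash_alt (input_array : List String) : List (List String) :=
  roundsB (input_array.length + 1) [(false, input_array)]

-- ===== PRECONDITION & SPEC =====
-- Pre_dash excludes exactly the inputs starting with "-" whose Python neighbours arr[-1] and arr[1]
-- both parse as ints spanning a nonempty range: there A recurses on arrays that never shrink and
-- crashes (RecursionError / memory exhaustion) instead of returning; B's while loop never empties either.
def Pre_dash (input_array : List String) : Prop :=
  ¬ (input_array.head? = some "-" ∧
     ((PySem.List.pyGet? input_array (-1)).bind PySem.Int.ofStr?).isSome = true ∧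
     ((PySem.List.pyGet? input_array 1).bind PySem.Int.ofStr?).isSome = true ∧
     ((PySem.List.pyGet? input_array (-1)).bind PySem.Int.ofStr?).getD 0 ≤
       ((PySem.List.pyGet? input_array 1).bind PySem.Int.ofStr?).getD 0)
instance (input_array : List String) : Decidable (Pre_dash input_array) := by
  unfold Pre_dash; infer_instance

def pvWitness_dash : List String := ["1", "-", "3"]

def Spec_dash (input_array : List String) (out : List (List String)) : Prop := out = dash_alt input_array
instance (input_array : List String) (out : List (List String)) : Decidable (Spec_dash input_array out) := by unfold Spec_dash; infer_instance

-- ===== CLAIM (what is proved, stated in full; the proofs are below) =====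
def Claim_equal_dash : Prop := ∀ (input_array : List String), Dom_dash input_array → Pre_dash input_array → Spec_dash input_array (dash input_array)

-- ===== LEMMAS AND PROOFS =====

-- A's index scan from e with accumulator out, characterised through B's findDash
theorem dashLoop_char (rec : List String → List (List String)) (arr : List String) :
    ∀ (e : Nat) (out : List (List String)),
      dashLoop rec arr e out =
        match findDash (arr.drop e) e with
        | none => out
        | some i =>
          match (PySem.List.pyGet? arr ((i : Int) - 1)).bind PySem.Int.ofStr?,
                (PySem.List.pyGet? arr ((i : Int) + 1)).bind PySem.Int.ofStr? with
          | some num1, some num2 =>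
              (((PySem.List.pyRange num1 (num2 + 1) 1).map
                  (fun n => PySem.List.slice arr (some 0) (some ((i : Int) - 1)) ++
                            [PySem.Int.toStr n] ++
                            PySem.List.slice arr (some ((i : Int) + 2)) none)).flatMap rec)
          | _, _ => out := by
  intro e out
  fun_induction dashLoop rec arr e out
  case case1 =>
    rename_i e h hd pb pa num1 num2 h2 h1
    rw [List.drop_eq_getElem_cons h]
    simp [findDash, hd, h1, h2]
    rw [show pb = PySem.List.slice arr none (some ((e : Int) - 1)) from PySem.List.slice_zero_start arr _]
  case case2 =>
    rename_i e h hd hno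
    rw [List.drop_eq_getElem_cons h]
    simp only [findDash, hd]
    rcases h1 : (PySem.List.pyGet? arr ((e : Int) - 1)).bind PySem.Int.ofStr? with _ | a
    · simp
    · rcases h2 : (PySem.List.pyGet? arr ((e : Int) + 1)).bind PySem.Int.ofStr? with _ | b
      · simp
      · exact (hno a b h1 h2).elim
  case case3 =>
    rename_i e h hd ih
    rw [List.drop_eq_getElem_cons h]
    simp only [findDash, hd]
    exact ih
  case case4 =>
    rename_i e h
    rw [List.drop_eq_nil_of_le (by omega)]
    simp [findDash]

-- one expansion level of A's recursion, characterised through B's stepB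
theorem dashF_char (f : Nat) (arr : List String) :
    dashF (f + 1) arr =
      match stepB arr with
      | none => [arr]
      | some cs => cs.flatMap (dashF f) := by
  show dashLoop (dashF f) arr 0 [arr] = _
  rw [dashLoop_char]
  unfold stepB
  rcases hfd : findDash (arr.drop 0) 0 with _ | i
  · simp at hfd ⊢
    rw [hfd]
  · simp at hfd
    rw [hfd]
    rcases h1 : (PySem.List.pyGet? arr ((i : Int) - 1)).bind PySem.Int.ofStr? with _ | a
    · simp [h1]
    · rcases h2 : (PySem.List.pyGet? arr ((i : Int) + 1)).bind PySem.Int.ofStr? with _ | b <;> simp [h1, h2]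

-- one round of B's worklist absorbs exactly one expansion level of A's recursion
theorem expand_flat (f : Nat) (items : List (Bool × List String)) :
    (expandOnce items).flatMap (fun it => if it.1 then [it.2] else dashF f it.2) =
      items.flatMap (fun it => if it.1 then [it.2] else dashF (f + 1) it.2) := by
  induction items with
  | nil => rfl
  | cons x xs ihx =>
      rcases x with ⟨d, a⟩
      simp only [expandOnce, List.flatMap_cons, List.flatMap_append] at ihx ⊢
      rw [ihx]
      congr 1
      cases d
      · rcases hs : stepB a with _ | cs
        · simp [dashF_char, hs]
        · simp [dashF_char, hs, List.flatMap_map]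
      · simp

-- B's round loop computes, item by item, A's fuel-indexed recursion (same fuel)
theorem rounds_eq (f : Nat) :
    ∀ items : List (Bool × List String),
      roundsB f items =
        items.flatMap (fun it => if it.1 then [it.2] else dashF f it.2) := by
  induction f with
  | zero =>
      intro items
      show items.map (fun it => it.2) = _
      induction items with
      | nil => rfl
      | cons x xs ih => rcases x with ⟨d, a⟩; cases d <;> simp [dashF, ih]
  | succ f ih =>
      intro items
      show (if items.all (fun it => it.1) then items.map (fun it => it.2)
            else roundsB f (expandOnce items)) = _
      split
      · rename_i hall
        induction items with
        | nil => rfl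
        | cons x xs ihx =>
            rcases x with ⟨d, a⟩
            simp only [List.all_cons, Bool.and_eq_true] at hall
            cases d
            · simp at hall
            · simp [ihx hall.2]
      · rw [ih (expandOnce items), expand_flat]

-- ===== VERDICT (by name: the statement is the Claim_ definition above) =====
theorem dash_spec : Claim_equal_dash := by
  intro input_array _ _
  unfold Spec_dash dash dash_alt
  rw [rounds_eq]
  simp [dashF]
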